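-- pv_equiv track=rewrite | github.com/mochp/celery-server | core/application/helper.py | cut_index
-- ===== SOURCE A (Python) =====
-- def cut_index(labels):
--     index = []
--     init = 0
--     number = 0
--     for i, label in enumerate(labels):
--         if label == "application" and (number > 2 or init == 0):
--             index.append(i)
--             init = 1
--             number = 0
--         number += 1
--     return index
-- ===== SOURCE B (Python) =====
-- def cut_index(labels):
--     out = []
--     start = 0
--     while True:
--         try:
--             p = labels.index("application", start)
--         except ValueError:
--             return out
--         out.append(p)
--         start = p + 3
-- ===== Notes on version B (the rewrite author's own statement) =====
-- stated objective: alternative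
-- what changed: Replaces A's element-by-element scan with counter/init state by a search-and-jump loop: repeatedly call labels.index('application', start) to find the next match and jump start to p+3, so elements inside the 3-wide gap are never compared.
import Mathlib
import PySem

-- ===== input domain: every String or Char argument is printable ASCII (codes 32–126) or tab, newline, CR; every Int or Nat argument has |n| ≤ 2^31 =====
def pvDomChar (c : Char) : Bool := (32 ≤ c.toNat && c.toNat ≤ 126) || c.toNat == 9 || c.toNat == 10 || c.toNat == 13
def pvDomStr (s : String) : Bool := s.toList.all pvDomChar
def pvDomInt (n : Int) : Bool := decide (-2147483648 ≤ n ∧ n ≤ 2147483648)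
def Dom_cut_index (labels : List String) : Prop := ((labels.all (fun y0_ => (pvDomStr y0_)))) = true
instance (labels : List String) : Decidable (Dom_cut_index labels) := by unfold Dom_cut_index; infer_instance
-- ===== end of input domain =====

-- B replaces A's per-element scan with counter/init state by a search-and-jump loop:
-- repeatedly look up the NEXT 'application' from a moving start and jump start to p+3
-- (objective: alternative; same O(n) cost, different traversal — elements in the gap are never compared).

-- ===== PORT A =====
-- A's for-loop over enumerate(labels) with state (index, init, number).
def cutIndexLoopA : List (Int × String) → List Int → Int → Int → List Int
  | [], index, _, _ => index
  | (i, label) :: rest, index, init, number =>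
    if label == "application" && (decide (number > 2) || init == 0) then
      cutIndexLoopA rest (index ++ [i]) 1 (0 + 1)
    else
      cutIndexLoopA rest index init (number + 1)

def cut_index (labels : List String) : List Int :=
  cutIndexLoopA (PySem.List.enumerate labels) [] 0 0

-- ===== PORT B =====
-- Source B's while-loop: labels.index("application", start) raising ValueError ↔ index? on the
-- suffix labels.drop start returning none (Python's index-with-start searches exactly that
-- suffix and returns start + its local index); the loop state (out, start) is carried as
-- (out, off) with the not-yet-searched suffix ls = labels.drop off.
def cutIndexJumpB (ls : List String) (off : Int) (out : List Int) : List Int :=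
  match h : PySem.List.index? ls "application" with
  | none => out                                   -- ValueError: return out
  | some j => cutIndexJumpB (ls.drop (j + 3)) (off + j + 3) (out ++ [off + j])
termination_by ls.length
decreasing_by
  have hm : "application" ∈ ls := (PySem.List.index?_isSome_iff ls "application").1 (by rw [h]; rfl)
  have hp : 0 < ls.length := List.length_pos_of_mem hm
  simp only [List.length_drop]
  omega

def cut_index_alt (labels : List String) : List Int :=
  cutIndexJumpB labels 0 []

-- ===== PRECONDITION & SPEC =====
def Spec_cut_index (labels : List String) (out : List Int) : Prop := out = cut_index_alt labels
instance (labels : List String) (out : List Int) : Decidable (Spec_cut_index labels out) := by unfold Spec_cut_index; infer_instance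

-- ===== CLAIM (what is proved, stated in full; the proofs are below) =====
def Claim_equal_cut_index : Prop := ∀ (labels : List String), Dom_cut_index labels → Spec_cut_index labels (cut_index labels)

-- ===== LEMMAS AND PROOFS =====

-- proof-side middle man: greedy spacing filter over the candidate positions
def cutIndexGreedy : List Int → List Int → Option Int → List Int
  | [], out, _ => out
  | p :: ps, out, none => cutIndexGreedy ps (out ++ [p]) (some p)
  | p :: ps, out, some last =>
    if p - last ≥ 3 then cutIndexGreedy ps (out ++ [p]) (some p)
    else cutIndexGreedy ps out (some last)

-- candidate positions of the suffix enumerated from s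
def posFrom (labels : List String) (s : Int) : List Int :=
  ((PySem.List.enumerate labels s).filter (fun q => q.2 == "application")).map (fun q => q.1)

theorem posFrom_nil (s : Int) : posFrom [] s = [] := rfl

theorem posFrom_cons (l : String) (ls : List String) (s : Int) :
    posFrom (l :: ls) s =
      if l == "application" then s :: posFrom ls (s + 1) else posFrom ls (s + 1) := by
  rw [posFrom, PySem.List.enumerate_cons]
  by_cases h : l == "application" <;> simp [posFrom, h]

theorem posFrom_append (xs ys : List String) (s : Int) :
    posFrom (xs ++ ys) s = posFrom xs s ++ posFrom ys (s + xs.length) := by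
  induction xs generalizing s with
  | nil => simp [posFrom_nil]
  | cons x xs ih =>
    rw [List.cons_append, posFrom_cons, posFrom_cons, ih (s + 1)]
    by_cases h : x == "application" <;> simp [h] <;> ring_nf

theorem posFrom_of_not_mem (xs : List String) (s : Int) (h : "application" ∉ xs) :
    posFrom xs s = [] := by
  induction xs generalizing s with
  | nil => rfl
  | cons x xs ih =>
    rw [posFrom_cons]
    have hx : ¬ (x == "application") = true := by
      simp only [beq_iff_eq]; intro he; exact h (he ▸ List.mem_cons_self ..)
    simp only [hx]
    exact ih (s + 1) (fun hm => h (List.mem_cons_of_mem _ hm))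

-- a candidate closer than 3 to the last accepted one is rejected regardless of the element
theorem greedy_skip (ls : List String) (i last : Int) (acc : List Int)
    (h : i - last < 3) :
    cutIndexGreedy (posFrom ls i) acc (some last) =
      cutIndexGreedy (posFrom (ls.drop 1) (i + 1)) acc (some last) := by
  cases ls with
  | nil => simp [posFrom_nil]
  | cons l ls =>
    rw [posFrom_cons]
    by_cases hl : l == "application"
    · simp only [hl, if_true, cutIndexGreedy, if_neg (by omega : ¬ i - last ≥ 3)]
      simp
    · simp [hl]

-- once init = 1, A's counter equals i - last where last is the last accepted index
theorem loopA_eq_greedy_some (ls : List String) :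
    ∀ (i last : Int) (acc : List Int),
      cutIndexLoopA (PySem.List.enumerate ls i) acc 1 (i - last) =
        cutIndexGreedy (posFrom ls i) acc (some last) := by
  induction ls with
  | nil => intro i last acc; simp [PySem.List.enumerate_nil, posFrom_nil, cutIndexLoopA, cutIndexGreedy]
  | cons l ls ih =>
    intro i last acc
    rw [PySem.List.enumerate_cons, posFrom_cons]
    by_cases hl : l == "application"
    · simp only [hl, if_true, cutIndexLoopA, Bool.true_and]
      by_cases hg : i - last > 2
      · have h3 : i - last ≥ 3 := by omega
        simp only [hg, decide_true, Bool.true_or, cutIndexGreedy, h3, if_pos]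
        have := ih (i + 1) i (acc ++ [i])
        simpa [show i + 1 - i = 0 + 1 by ring] using this
      · have h3 : ¬ (i - last ≥ 3) := by omega
        simp only [hg, decide_false, Bool.false_or, if_false, cutIndexGreedy, h3]
        have := ih (i + 1) last acc
        simpa [show i + 1 - last = i - last + 1 by ring] using this
    · simp only [hl, cutIndexLoopA, Bool.false_and]
      have := ih (i + 1) last acc
      simpa [show i + 1 - last = i - last + 1 by ring] using this

-- before the first acceptance (init = 0) the counter value is irrelevant
theorem loopA_eq_greedy_none (ls : List String) :
    ∀ (i n : Int) (acc : List Int),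
      cutIndexLoopA (PySem.List.enumerate ls i) acc 0 n =
        cutIndexGreedy (posFrom ls i) acc none := by
  induction ls with
  | nil => intro i n acc; simp [PySem.List.enumerate_nil, posFrom_nil, cutIndexLoopA, cutIndexGreedy]
  | cons l ls ih =>
    intro i n acc
    rw [PySem.List.enumerate_cons, posFrom_cons]
    by_cases hl : l == "application"
    · simp only [hl, cutIndexLoopA, Bool.true_and, if_true, cutIndexGreedy]
      have := loopA_eq_greedy_some ls (i + 1) i (acc ++ [i])
      simpa [show i + 1 - i = 0 + 1 by ring] using this
    · simp only [hl, cutIndexLoopA, Bool.false_and]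
      exact ih (i + 1) (n + 1) acc

theorem jumpB_none (ls : List String) (off : Int) (acc : List Int)
    (h : PySem.List.index? ls "application" = none) :
    cutIndexJumpB ls off acc = acc := by
  rw [cutIndexJumpB.eq_def]
  split
  · rfl
  · next j heq => rw [h] at heq; cases heq

theorem jumpB_some (ls : List String) (off : Int) (acc : List Int) (j : Nat)
    (h : PySem.List.index? ls "application" = some j) :
    cutIndexJumpB ls off acc =
      cutIndexJumpB (ls.drop (j + 3)) (off + j + 3) (acc ++ [off + j]) := by
  rw [cutIndexJumpB.eq_def]
  split
  · next heq => rw [h] at heq; cases heq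
  · next j' heq =>
      rw [h] at heq
      cases heq
      rfl

-- a state whose last acceptance (if any) lies at least 3 below off accepts the first candidate
def freshState (st : Option Int) (off : Int) : Prop :=
  st = none ∨ ∃ last, st = some last ∧ last + 3 ≤ off

-- B's jump loop equals the greedy filter over the candidates of the remaining suffix
theorem jumpB_eq_greedy :
    ∀ (n : Nat) (ls : List String), ls.length ≤ n → ∀ (off : Int) (acc : List Int) (st : Option Int),
      freshState st off →
      cutIndexJumpB ls off acc = cutIndexGreedy (posFrom ls off) acc st := by
  intro n
  induction n with
  | zero =>
    intro ls hlen off acc st hst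
    have : ls = [] := List.eq_nil_of_length_eq_zero (Nat.le_zero.1 hlen)
    subst this
    rw [jumpB_none [] off acc rfl]
    rcases hst with h | ⟨last, h, _⟩ <;> subst h <;>
      simp [posFrom_nil, cutIndexGreedy]
  | succ n ih =>
    intro ls hlen off acc st hst
    rcases hidx : PySem.List.index? ls "application" with _ | j
    · have hnm : "application" ∉ ls := (PySem.List.index?_eq_none_iff ls "application").1 hidx
      rw [jumpB_none ls off acc hidx, posFrom_of_not_mem ls off hnm]
      rcases hst with h | ⟨last, h, _⟩ <;> subst h <;> simp [cutIndexGreedy]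
    · rw [jumpB_some ls off acc j hidx]
      obtain ⟨pre, suf, hls, hpre, hnm⟩ := (PySem.List.index?_eq_some_iff ls "application" j).1 hidx
      subst hls
      -- candidates: first one is off + j, at distance ≥ 3 from any fresh state
      have hpos : posFrom (pre ++ "application" :: suf) off =
          (off + j) :: posFrom suf (off + j + 1) := by
        rw [posFrom_append, posFrom_of_not_mem pre off hnm, posFrom_cons, hpre]
        simp [add_assoc]
      rw [hpos]
      -- the greedy filter accepts off + j
      have hacc : cutIndexGreedy ((off + j) :: posFrom suf (off + j + 1)) acc st =
          cutIndexGreedy (posFrom suf (off + j + 1)) (acc ++ [off + j]) (some (off + j)) := by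
        rcases hst with h | ⟨last, h, hle⟩ <;> subst h
        · rfl
        · have : (off + j) - last ≥ 3 := by
            have : (0:Int) ≤ (j : Int) := Int.natCast_nonneg j
            omega
          simp [cutIndexGreedy, this]
      rw [hacc]
      -- skip the two positions inside the jump gap
      rw [greedy_skip suf (off + j + 1) (off + j) _ (by omega),
          greedy_skip (suf.drop 1) (off + j + 1 + 1) (off + j) _ (by omega)]
      -- remaining suffix is exactly what B recurses on
      have hdrop : (pre ++ "application" :: suf).drop (j + 3) = (suf.drop 1).drop 1 := by
        have h1 : (pre ++ "application" :: suf).drop (j + 1) = suf := by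
          rw [show j + 1 = pre.length + 1 from by omega]
          rw [show pre.length + 1 = (pre ++ ["application"]).length from by simp]
          rw [show pre ++ "application" :: suf = (pre ++ ["application"]) ++ suf from by simp]
          exact List.drop_left
        have : (pre ++ "application" :: suf).drop (j + 3) =
            ((pre ++ "application" :: suf).drop (j + 1)).drop 2 := by
          rw [List.drop_drop]
        rw [this, h1, List.drop_drop]
      have hlen2 : ((pre ++ "application" :: suf).drop (j + 3)).length ≤ n := by
        rw [List.length_drop]
        simp only [List.length_append, List.length_cons] at hlen ⊢
        omega
      have := ih ((pre ++ "application" :: suf).drop (j + 3)) hlen2 (off + j + 3)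
        (acc ++ [off + j]) (some (off + j)) (Or.inr ⟨off + j, rfl, by omega⟩)
      rw [this, hdrop]
      have : off + j + 1 + 1 + 1 = off + j + 3 := by ring
      rw [this]

-- ===== VERDICT (by name: the statement is the Claim_ definition above) =====
theorem cut_index_spec : Claim_equal_cut_index := by
  intro labels _
  unfold Spec_cut_index cut_index cut_index_alt
  rw [loopA_eq_greedy_none labels 0 0 []]
  exact (jumpB_eq_greedy labels.length labels le_rfl 0 [] none (Or.inl rfl)).symm
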